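-- pv_equiv track=rewrite | github.com/Nearrin/CompetitiveProgrammingSolutions | LeetCode/remove-duplicate-letters.py | check
-- ===== SOURCE A (Python) =====
-- def check(c,s):
--     from collections import defaultdict
--     cnt=defaultdict(int)
--     for v in s:
--         cnt[v]+=1
--     if cnt[c]==0:
--         return False
--     for v in s:
--         if v==c:
--             return True
--         if cnt[v]==1:
--             return False
--         cnt[v]-=1#忘了这句话跪了TAT
-- ===== SOURCE B (Python) =====
-- def check(c, s):
--     if c not in set(s):
--         return False
--     p = s.index(c)
--     return all(s[i] in s[i + 1:] for i in range(p))
-- ===== Notes on version B (the rewrite author's own statement) =====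
-- stated objective: simpler
-- what changed: A builds a character-count dictionary over the whole string and sweeps it decrementing counts; B keeps no table at all: it finds the first occurrence of c and directly checks that each earlier character reappears in the suffix behind it, touching only the prefix before c.
import Mathlib
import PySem

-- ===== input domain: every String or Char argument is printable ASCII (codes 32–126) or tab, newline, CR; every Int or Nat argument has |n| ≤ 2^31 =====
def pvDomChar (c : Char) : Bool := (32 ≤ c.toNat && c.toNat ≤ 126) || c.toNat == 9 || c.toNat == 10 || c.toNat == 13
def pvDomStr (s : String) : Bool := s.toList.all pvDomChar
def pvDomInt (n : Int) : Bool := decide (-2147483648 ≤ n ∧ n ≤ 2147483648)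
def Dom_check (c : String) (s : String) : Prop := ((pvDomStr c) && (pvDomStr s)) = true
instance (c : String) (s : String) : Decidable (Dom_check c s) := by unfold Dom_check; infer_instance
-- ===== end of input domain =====

-- B replaces A's counter-table single pass by a direct check that every character before the
-- first occurrence of c reappears in the suffix behind it (no table maintained); objective: simpler.

-- ===== PORT A =====
-- second loop of A; Python's iteration variables are length-1 strings, modelled as String.singleton.
-- The [] case is unreachable under the cnt[c] ≠ 0 guard (Python would return None there); false is arbitrary.
def checkGo (c : String) : List Char → PySem.Dict String Int → Bool
  | [], _ => false
  | v :: rest, cnt =>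
    if String.singleton v == c then true
    else if cnt.getD (String.singleton v) 0 == 1 then false
    else checkGo c rest (cnt.modify (String.singleton v) 0 (· - 1))

def check (c : String) (s : String) : Bool :=
  let cnt : PySem.Dict String Int :=
    s.toList.foldl (fun d v => d.modify (String.singleton v) 0 (· + 1)) PySem.Dict.empty
  if cnt.getD c 0 == 0 then false
  else checkGo c s.toList cnt

-- ===== PORT B =====
def check_alt (c : String) (s : String) : Bool :=
  if !(PySem.Set.contains (PySem.Set.ofList (s.toList.map String.singleton)) c) then false
  else
    -- p = s.index(c); c is in s here, so index = find (no ValueError)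
    let p := PySem.Str.find s c
    (PySem.List.pyRange 0 p 1).all fun i =>
      -- s[i] in s[i+1:]; 0 ≤ i < p < len(s), so s[i] is in range ("" branch unreachable)
      PySem.Str.isIn ((PySem.Str.pyGet? s i).elim "" String.singleton)
        (PySem.Str.slice s (some (i + 1)) none)

-- ===== PRECONDITION & SPEC =====
def Spec_check (c : String) (s : String) (out : Bool) : Prop := out = check_alt c s
instance (c : String) (s : String) (out : Bool) : Decidable (Spec_check c s out) := by unfold Spec_check; infer_instance

-- ===== CLAIM (what is proved, stated in full; the proofs are below) =====
def Claim_equal_check : Prop := ∀ (c : String) (s : String), Dom_check c s → Spec_check c s (check c s)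

-- ===== LEMMAS AND PROOFS =====

theorem singleton_inj (a b : Char) : String.singleton a = String.singleton b ↔ a = b := by
  constructor
  · intro h
    have := congrArg String.toList h
    simpa using this
  · rintro rfl; rfl

-- abstract form of A's second loop: return True at c, False when the current char does not reappear
def loopSpec (c : String) : List Char → Bool
  | [] => false
  | v :: rest => if String.singleton v == c then true
                 else if v ∈ rest then loopSpec c rest else false

-- abstract form of B's scan
def bAll (l : List Char) (c0 : Char) : Bool :=
  (List.range (l.idxOf c0)).all (fun k => (l.drop (k + 1)).contains (l.getD k default))

theorem all_congr_mem {α : Type} (l : List α) (f g : α → Bool)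
    (h : ∀ x ∈ l, f x = g x) : l.all f = l.all g := by
  induction l with
  | nil => rfl
  | cons a t ih =>
    simp only [List.all_cons, h a (by simp)]
    rw [ih (fun x hx => h x (by simp [hx]))]

theorem cnt_getD (l : List Char) (k : String) :
    (l.foldl (fun d v => d.modify (String.singleton v) 0 (· + 1)) PySem.Dict.empty).getD k 0
      = ((l.map String.singleton).count k : Int) := by
  rw [show (List.foldl (fun d v => d.modify (String.singleton v) 0 fun x => x + 1)
        (PySem.Dict.empty : PySem.Dict String Int) l)
      = (List.foldl (fun d x => d.modify x 0 fun y => y + 1)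
        (PySem.Dict.empty : PySem.Dict String Int) (l.map String.singleton))
    from (List.foldl_map (f := String.singleton)
        (g := fun (d : PySem.Dict String Int) x => d.modify x 0 fun y => y + 1)
        (l := l) (init := (PySem.Dict.empty : PySem.Dict String Int))).symm]
  rw [PySem.Dict.getD_foldl_modify_add_one]
  simp [PySem.Dict.getD_empty]

theorem checkGo_eq_loopSpec (c : String) (l : List Char) (cnt : PySem.Dict String Int)
    (h : ∀ x : Char, cnt.getD (String.singleton x) 0 = (l.count x : Int)) :
    checkGo c l cnt = loopSpec c l := by
  induction l generalizing cnt with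
  | nil => rfl
  | cons v rest ih =>
    simp only [checkGo, loopSpec]
    by_cases hc : String.singleton v = c
    · simp [hc]
    · have hc' : (String.singleton v == c) = false := by
        simp [hc]
      simp only [hc', if_false, Bool.false_eq_true]
      have hv := h v
      rw [List.count_cons_self] at hv
      by_cases hm : v ∈ rest
      · have hpos : 0 < rest.count v := List.count_pos_iff.mpr hm
        have hne : (cnt.getD (String.singleton v) 0 == 1) = false := by
          rw [hv]; simp; omega
        simp only [hne, if_false, Bool.false_eq_true, hm, if_true]
        apply ih
        intro x
        rw [PySem.Dict.getD_modify]
        by_cases hx : x = v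
        · subst hx
          simp [hv]
        · have : String.singleton x ≠ String.singleton v := by
            simp [singleton_inj, hx]
          rw [if_neg this, h x]
          simp [Ne.symm hx]
      · have hz : rest.count v = 0 := List.count_eq_zero.mpr hm
        have : (cnt.getD (String.singleton v) 0 == 1) = true := by
          rw [hv, hz]; simp
        simp [this, hm]

theorem bAll_eq_loopSpec (c0 : Char) (l : List Char) (h : c0 ∈ l) :
    bAll l c0 = loopSpec (String.singleton c0) l := by
  induction l with
  | nil => cases h
  | cons v rest ih =>
    by_cases hv : v = c0
    · subst hv
      simp [bAll, loopSpec, List.idxOf_cons_self]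
    · have hm : c0 ∈ rest := by
        rcases List.mem_cons.mp h with h1 | h1
        · exact absurd h1.symm hv
        · exact h1
      have hidx : (v :: rest).idxOf c0 = rest.idxOf c0 + 1 := by
        simp [hv]
      have hcne : (String.singleton v == String.singleton c0) = false := by
        simp [singleton_inj, hv]
      simp only [bAll, hidx, List.range_succ_eq_map, List.all_cons, List.all_map]
      have htail : (List.range (List.idxOf c0 rest)).all
          ((fun k => (List.drop (k + 1) (v :: rest)).contains ((v :: rest).getD k default)) ∘ Nat.succ)
          = bAll rest c0 := by
        unfold bAll
        apply all_congr_mem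
        intro k _
        simp [Function.comp]
      rw [htail, ih hm]
      simp only [loopSpec, hcne, Bool.false_eq_true, if_false]
      by_cases hvm : v ∈ rest
      · simp [hvm]
      · simp [hvm]

theorem singleton_prefix (x : Char) (ys : List Char) :
    [x] <+: ys ↔ ys.head? = some x := by
  cases ys with
  | nil => simp
  | cons b t => simp [List.cons_prefix_cons, eq_comm]

theorem isIn_singleton (x : Char) (ys : List Char) :
    PySem.Chars.isIn [x] ys = ys.contains x := by
  rcases hx : ys.contains x with _ | _
  · rw [PySem.Chars.isIn_eq_false_iff]
    intro hinf
    have : x ∈ ys := List.singleton_sublist.mp hinf.sublist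
    simp at hx
    exact hx this
  · have : x ∈ ys := by simpa [List.contains_iff_mem] using hx
    obtain ⟨u, w, rfl⟩ := List.append_of_mem this
    rw [PySem.Chars.isIn_iff_infix]
    exact ⟨u, w, by simp⟩

theorem idxOf_min (c0 : Char) (l : List Char) (i : Nat) (hi : i < l.length)
    (h : l[i] = c0) : l.idxOf c0 ≤ i := by
  induction l generalizing i with
  | nil => simp at hi
  | cons a t ih =>
    by_cases ha : a = c0
    · simp [ha]
    · cases i with
      | zero => simp at h; exact absurd h ha
      | succ j =>
        have hcons : List.idxOf c0 (a :: t) = List.idxOf c0 t + 1 := by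
          simp [ha]
        simp only [List.length_cons, Nat.succ_lt_succ_iff] at hi
        simp only [List.getElem_cons_succ] at h
        have := ih j hi h
        omega

theorem find_singleton (c0 : Char) (l : List Char) (h : c0 ∈ l) :
    PySem.Chars.find l [c0] = (l.idxOf c0 : Int) := by
  have hinf : [c0] <:+: l := by
    obtain ⟨u, w, rfl⟩ := List.append_of_mem h
    exact ⟨u, w, by simp⟩
  have hnn : 0 ≤ PySem.Chars.find l [c0] := (PySem.Chars.find_nonneg_iff _ _).mpr hinf
  obtain ⟨hpre, hmin⟩ := PySem.Chars.find_spec (s := l) (sub := [c0]) hnn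
  set m := (PySem.Chars.find l [c0]).toNat with hm
  have hml : m < l.length := by
    rcases (singleton_prefix _ _).mp hpre with hh
    have : (l.drop m) ≠ [] := by
      intro hnil; rw [hnil] at hh; simp at hh
    have := List.length_pos_iff.mpr this
    simp at this
    omega
  have hgm : l[m] = c0 := by
    have hh := (singleton_prefix _ _).mp hpre
    rw [List.head?_drop] at hh
    simpa [List.getElem?_eq_getElem hml] using hh
  have h1 : l.idxOf c0 ≤ m := idxOf_min c0 l m hml hgm
  have h2 : ¬ (l.idxOf c0 < m) := by
    intro hlt
    apply hmin (l.idxOf c0) hlt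
    rw [singleton_prefix, List.head?_drop]
    have hi : l.idxOf c0 < l.length := List.idxOf_lt_length_of_mem h
    simp [List.getElem?_eq_getElem hi, List.getElem_idxOf]
  have : l.idxOf c0 = m := by omega
  omega

-- ===== VERDICT (by name: the statement is the Claim_ definition above) =====
theorem check_spec : Claim_equal_check := by
  unfold Claim_equal_check Spec_check
  intro c s _
  simp only [check, check_alt]
  rw [cnt_getD]
  by_cases hmem : c ∈ s.toList.map String.singleton
  · -- guards both pass
    have hcontains : PySem.Set.contains (PySem.Set.ofList (s.toList.map String.singleton)) c = true := by
      rw [PySem.Set.contains_iff]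
      simpa [PySem.Set.mem_ofList] using hmem
    have hcount : (s.toList.map String.singleton).count c ≠ 0 := by
      simpa [List.count_eq_zero] using hmem
    have hA : (((s.toList.map String.singleton).count c : Int) == 0) = false := by
      simp; exact_mod_cast hcount
    simp only [hA, hcontains, Bool.not_true, Bool.false_eq_true, if_false]
    -- A side
    obtain ⟨c0, hc0, rfl⟩ := List.mem_map.mp hmem
    have hAside : checkGo (String.singleton c0) s.toList
        (s.toList.foldl (fun d v => d.modify (String.singleton v) 0 (· + 1)) PySem.Dict.empty)
        = loopSpec (String.singleton c0) s.toList := by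
      apply checkGo_eq_loopSpec
      intro x
      rw [cnt_getD]
      congr 1
      exact List.count_map_of_injective _ _ (fun a b => (singleton_inj a b).mp) _
    rw [hAside, ← bAll_eq_loopSpec c0 s.toList hc0]
    -- B side
    have hfind : PySem.Str.find s (String.singleton c0) = (s.toList.idxOf c0 : Int) := by
      rw [PySem.Str.find_eq]
      simpa using find_singleton c0 s.toList hc0
    rw [hfind]
    set q := s.toList.idxOf c0 with hq
    have hql : q < s.toList.length := List.idxOf_lt_length_of_mem hc0
    rw [PySem.List.pyRange_one, List.all_map]
    unfold bAll
    rw [← hq]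
    have hqt : ((q : Int) - 0).toNat = q := by omega
    rw [hqt]
    apply all_congr_mem
    intro k hk
    simp only [Function.comp]
    have hkq : k < q := List.mem_range.mp hk
    have hkl : k < s.toList.length := by omega
    have hget : PySem.Str.pyGet? s ((0 : Int) + (k : Nat)) = some (s.toList[k]) := by
      simp [List.getElem?_eq_getElem hkl]
    rw [hget]
    simp only [Option.elim]
    have hslice : (PySem.Str.slice s (some ((0 : Int) + (k : Nat) + 1)) none).toList
        = s.toList.drop (k + 1) := by
      rw [PySem.Str.toList_slice]
      have : ((0 : Int) + (k : Nat) + 1) = (((k + 1 : Nat)) : Int) := by push_cast; ring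
      rw [this]
      exact PySem.List.slice_from_natCast _ _
    rw [PySem.Str.isIn_eq]
    have htl : (String.singleton (s.toList[k])).toList = [s.toList[k]] := by simp
    rw [htl, hslice, isIn_singleton]
    have : s.toList.getD k default = s.toList[k] := List.getD_eq_getElem _ _ hkl
    rw [this]
  · -- c is not a character of s: both return false
    have hcontains : PySem.Set.contains (PySem.Set.ofList (s.toList.map String.singleton)) c = false := by
      rw [← Bool.not_eq_true, PySem.Set.contains_iff]
      simpa [PySem.Set.mem_ofList] using hmem
    have hAg : (((s.toList.map String.singleton).count c : Int) == 0) = true := by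
      simp [List.count_eq_zero.mpr hmem]
    rw [hAg, hcontains]
    simp
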